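-- pv_equiv track=rewrite | github.com/tatawe5/tg | FinancialInventorySync/number_extractor.py | _filter_and_dedupe
-- ===== SOURCE A (Python) =====
-- from typing import List, Tuple
--
-- def _filter_and_dedupe(numbers: List[str]) -> List[str]:
--     """Filter numbers by length and remove duplicates"""
--     # Remove duplicates while preserving order
--     seen = set()
--     unique_numbers = []
--
--     for num in numbers:
--         # Accept any sequence of 3+ digits, including 8-digit numbers
--         if num not in seen and len(num) >= 3 and len(num) <= 20:  # Up to 20 digits max
--             seen.add(num)
--             unique_numbers.append(num)
--
--     # Sort by length (longer numbers first) then by value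
--     # This ensures 8-digit numbers appear before shorter ones
--     unique_numbers.sort(key=lambda x: (-len(x), x))
--
--     return unique_numbers
-- ===== SOURCE B (Python) =====
-- from typing import List
--
-- def _filter_and_dedupe(numbers: List[str]) -> List[str]:
--     """Filter numbers by length and remove duplicates"""
--     # Bucket the valid numbers (length 3..20) by length; sets dedupe per bucket.
--     buckets = {}
--     for num in numbers:
--         n = len(num)
--         if 3 <= n <= 20:
--             buckets.setdefault(n, set()).add(num)
--     # Longest lengths first; within a length, ascending order.
--     result = []
--     for n in range(20, 2, -1):
--         if n in buckets:
--             result.extend(sorted(buckets[n]))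
--     return result
-- ===== Notes on version B (the rewrite author's own statement) =====
-- stated objective: alternative
-- what changed: Instead of A's ordered dedup pass followed by one composite-key sort on (-len, value), B buckets the valid numbers by length into per-length sets in one pass and concatenates the per-length ascending sorts for lengths 20 down to 3.
import Mathlib
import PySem

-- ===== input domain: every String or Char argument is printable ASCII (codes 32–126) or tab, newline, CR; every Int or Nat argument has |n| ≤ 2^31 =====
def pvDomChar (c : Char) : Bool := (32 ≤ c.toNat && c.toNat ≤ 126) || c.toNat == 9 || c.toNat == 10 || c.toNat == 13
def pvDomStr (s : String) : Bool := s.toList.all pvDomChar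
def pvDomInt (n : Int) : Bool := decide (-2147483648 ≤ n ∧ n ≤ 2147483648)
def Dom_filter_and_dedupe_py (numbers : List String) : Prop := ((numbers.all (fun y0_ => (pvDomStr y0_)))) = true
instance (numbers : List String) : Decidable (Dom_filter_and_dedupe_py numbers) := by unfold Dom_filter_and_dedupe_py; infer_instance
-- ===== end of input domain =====

-- B buckets the valid numbers by length in one pass and concatenates per-length sorted buckets longest-first,
-- replacing A's ordered dedup pass followed by a composite-key sort (objective: alternative decomposition, same result).

-- ===== PORT A =====
def filter_and_dedupe_py (numbers : List String) : List String :=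
  -- seen = set(); unique_numbers = []; for num in numbers: if num not in seen and 3 <= len(num) <= 20: add/append
  let st := numbers.foldl
    (fun (st : PySem.Set String × List String) num =>
      if !(PySem.Set.contains st.1 num) && decide ((3:Int) ≤ PySem.Str.len num) && decide (PySem.Str.len num ≤ (20:Int)) then
        (PySem.Set.add st.1 num, st.2 ++ [num])
      else st)
    (PySem.Set.empty, [])
  -- unique_numbers.sort(key=lambda x: (-len(x), x))
  PySem.List.sorted2 st.2 (fun x => -(PySem.Str.len x)) (fun x => x)

-- ===== PORT B =====
def filter_and_dedupe_py_alt (numbers : List String) : List String :=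
  -- buckets = {}; for num in numbers: if 3 <= len(num) <= 20: buckets.setdefault(len(num), set()).add(num)
  let buckets : PySem.Dict Int (PySem.Set String) := numbers.foldl
    (fun d num =>
      if 3 ≤ PySem.Str.len num ∧ PySem.Str.len num ≤ 20 then
        d.insert (PySem.Str.len num) (PySem.Set.add (d.getD (PySem.Str.len num) PySem.Set.empty) num)
      else d)
    PySem.Dict.empty
  -- result = []; for n in range(20, 2, -1): if n in buckets: result.extend(sorted(buckets[n]))
  (PySem.List.pyRange 20 2 (-1)).foldl
    (fun acc n =>
      if buckets.contains n then
        acc ++ PySem.List.sorted (buckets.getD n PySem.Set.empty) (fun x => x)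
      else acc)
    []

-- ===== PRECONDITION & SPEC =====
def Spec_filter_and_dedupe_py (numbers : List String) (out : List String) : Prop := out = filter_and_dedupe_py_alt numbers
instance (numbers : List String) (out : List String) : Decidable (Spec_filter_and_dedupe_py numbers out) := by unfold Spec_filter_and_dedupe_py; infer_instance

-- ===== CLAIM (what is proved, stated in full; the proofs are below) =====
def Claim_equal_filter_and_dedupe_py : Prop := ∀ (numbers : List String), Dom_filter_and_dedupe_py numbers → Spec_filter_and_dedupe_py numbers (filter_and_dedupe_py numbers)

-- ===== LEMMAS AND PROOFS =====

-- the length filter both programs apply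
def pvValid (s : String) : Bool :=
  decide ((3:Int) ≤ PySem.Str.len s) && decide (PySem.Str.len s ≤ (20:Int))

-- A's composite sort key, as a lexicographic pair
def pvKey (x : String) : Lex (Int × String) := toLex (-(PySem.Str.len x), x)

-- bucket of length n: the distinct valid numbers of length n, in first-occurrence order
def pvS (numbers : List String) (n : Int) : PySem.Set String :=
  PySem.Set.ofList ((numbers.filter pvValid).filter (fun s => PySem.Str.len s == n))

-- sorted2 with two linear-order keys is sorted with the lexicographic pair key
theorem pv_sorted2_eq_sorted_lex {α κ₁ κ₂ : Type} [LinearOrder κ₁] [LinearOrder κ₂]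
    (xs : List α) (k1 : α → κ₁) (k2 : α → κ₂) :
    PySem.List.sorted2 xs k1 k2 = PySem.List.sorted xs (fun x => toLex (k1 x, k2 x)) := by
  simp only [PySem.List.sorted2, PySem.List.sorted]
  have h : (fun (a b : α) => decide (k1 a < k1 b) || (!decide (k1 b < k1 a) && decide (k2 a < k2 b)))
      = (fun (a b : α) => decide (toLex (k1 a, k2 a) < toLex (k1 b, k2 b))) := by
    funext a b
    by_cases h1 : k1 a < k1 b
    · simp [Prod.Lex.lt_iff, h1]
    · by_cases h2 : k1 b < k1 a
      · simp [Prod.Lex.lt_iff, h1, h2, ne_of_gt h2]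
      · have he : k1 a = k1 b := le_antisymm (le_of_not_gt h2) (le_of_not_gt h1)
        simp [Prod.Lex.lt_iff, he]
  simp [h]

-- A's loop: both accumulators coincide and compute set(filter(valid, numbers)) in first-occurrence order
theorem pvA_loop (l : List String) (u : List String) :
    l.foldl
      (fun (st : PySem.Set String × List String) num =>
        if !(PySem.Set.contains st.1 num) && decide ((3:Int) ≤ PySem.Str.len num) && decide (PySem.Str.len num ≤ (20:Int)) then
          (PySem.Set.add st.1 num, st.2 ++ [num])
        else st)
      (u, u)
    = ((l.filter pvValid).foldl PySem.Set.add u, (l.filter pvValid).foldl PySem.Set.add u) := by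
  induction l generalizing u with
  | nil => rfl
  | cons a l ih =>
    rw [List.foldl_cons, List.filter_cons]
    by_cases hv : pvValid a = true
    · by_cases hm : a ∈ u
      · have hc : PySem.Set.contains u a = true := (PySem.Set.contains_iff u a).mpr hm
        have hcond : (!(PySem.Set.contains u a) && decide ((3:Int) ≤ PySem.Str.len a) && decide (PySem.Str.len a ≤ (20:Int))) = false := by
          rw [hc]; rfl
        rw [hv, if_pos rfl, if_neg (by rw [hcond]; exact Bool.false_ne_true),
          List.foldl_cons, PySem.Set.add_of_mem hm, ih]
      · have hc : PySem.Set.contains u a = false := by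
          rw [← Bool.not_eq_true, (PySem.Set.contains_iff u a)]; exact hm
        have hcond : (!(PySem.Set.contains u a) && decide ((3:Int) ≤ PySem.Str.len a) && decide (PySem.Str.len a ≤ (20:Int))) = true := by
          rw [hc]
          simp only [pvValid] at hv
          rw [Bool.and_assoc, hv]; rfl
        rw [hv, if_pos rfl, if_pos hcond, List.foldl_cons,
          PySem.Set.add_of_not_mem hm]
        exact ih (u ++ [a])
    · have hv' : pvValid a = false := Bool.eq_false_iff.mpr hv
      have hcond : (!(PySem.Set.contains u a) && decide ((3:Int) ≤ PySem.Str.len a) && decide (PySem.Str.len a ≤ (20:Int))) = false := by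
        simp only [pvValid] at hv'
        rw [Bool.and_assoc, hv', Bool.and_false]
      rw [hv', if_neg Bool.false_ne_true, if_neg (by rw [hcond]; exact Bool.false_ne_true), ih]

-- set(filter(p, xs)) = filter(p, set(xs))
theorem pv_ofList_filter (xs : List String) (p : String → Bool) :
    PySem.Set.ofList (xs.filter p) = (PySem.Set.ofList xs).filter p := by
  induction xs using List.reverseRecOn with
  | nil => rfl
  | append_singleton xs x ih =>
    rw [List.filter_append, PySem.Set.ofList_append_singleton, List.filter_singleton]
    by_cases hp : p x = true
    · rw [hp]; simp only [Bool.cond_true]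
      rw [PySem.Set.ofList_append_singleton, ih]
      by_cases hm : x ∈ PySem.Set.ofList xs
      · rw [PySem.Set.add_of_mem hm, PySem.Set.add_of_mem (by
          rw [List.mem_filter]; exact ⟨hm, hp⟩)]
      · rw [PySem.Set.add_of_not_mem hm, PySem.Set.add_of_not_mem (by
          rw [List.mem_filter]; exact fun h => hm h.1), List.filter_append, List.filter_singleton, hp]; simp only [Bool.cond_true]
    · have hp' : p x = false := Bool.eq_false_iff.mpr hp
      rw [hp']; simp only [Bool.cond_false]
      rw [List.append_nil, ih, PySem.Set.add_eq_ite]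
      by_cases hm : x ∈ PySem.Set.ofList xs
      · rw [if_pos hm]
      · rw [if_neg hm, List.filter_append, List.filter_singleton, hp']; simp only [Bool.cond_false]; rw [List.append_nil]

-- B's first loop: the bucket at n collects exactly the valid numbers of length n
theorem pvB_getD (l : List String) (d : PySem.Dict Int (PySem.Set String)) (n : Int) :
    (l.foldl
      (fun d num =>
        if 3 ≤ PySem.Str.len num ∧ PySem.Str.len num ≤ 20 then
          d.insert (PySem.Str.len num) (PySem.Set.add (d.getD (PySem.Str.len num) PySem.Set.empty) num)
        else d) d).getD n PySem.Set.empty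
    = ((l.filter pvValid).filter (fun s => PySem.Str.len s == n)).foldl
        PySem.Set.add (d.getD n PySem.Set.empty) := by
  induction l generalizing d with
  | nil => rfl
  | cons a l ih =>
    rw [List.foldl_cons, List.filter_cons]
    by_cases hv : (3:Int) ≤ PySem.Str.len a ∧ PySem.Str.len a ≤ 20
    · have hv' : pvValid a = true := by
        simp only [pvValid, Bool.and_eq_true, decide_eq_true_eq]; exact hv
      rw [hv', if_pos rfl, List.filter_cons]
      rw [if_pos hv, ih]
      by_cases hn : PySem.Str.len a = n
      · rw [if_pos (by rw [hn]; exact beq_self_eq_true n), List.foldl_cons,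
          PySem.Dict.getD_insert, if_pos hn.symm, hn]
      · rw [if_neg (by simp only [beq_iff_eq]; exact fun h => hn h),
          PySem.Dict.getD_insert, if_neg (fun h => hn h.symm)]
    · have hv' : pvValid a = false := by
        simp only [pvValid, Bool.and_eq_false_iff, decide_eq_false_iff_not]
        by_cases h3 : (3:Int) ≤ PySem.Str.len a
        · exact Or.inr (fun h => hv ⟨h3, h⟩)
        · exact Or.inl h3
      rw [hv', if_neg Bool.false_ne_true, if_neg hv]
      exact ih d

-- B's first loop: a length key is present iff some valid number has that length
theorem pvB_contains (l : List String) (d : PySem.Dict Int (PySem.Set String)) (n : Int) :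
    ((l.foldl
      (fun d num =>
        if 3 ≤ PySem.Str.len num ∧ PySem.Str.len num ≤ 20 then
          d.insert (PySem.Str.len num) (PySem.Set.add (d.getD (PySem.Str.len num) PySem.Set.empty) num)
        else d) d).contains n = true)
    ↔ (d.contains n = true ∨ n ∈ (l.filter pvValid).map PySem.Str.len) := by
  induction l generalizing d with
  | nil => simp
  | cons a l ih =>
    rw [List.foldl_cons, List.filter_cons]
    by_cases hv : (3:Int) ≤ PySem.Str.len a ∧ PySem.Str.len a ≤ 20
    · have hv' : pvValid a = true := by
        simp only [pvValid, Bool.and_eq_true, decide_eq_true_eq]; exact hv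
      rw [hv', if_pos rfl, List.map_cons]
      rw [if_pos hv, ih, PySem.Dict.contains_insert, List.mem_cons]
      constructor
      · rintro (h | h)
        · rcases Bool.or_eq_true_iff.mp h with h | h
          · exact Or.inr (Or.inl (beq_iff_eq.mp h))
          · exact Or.inl h
        · exact Or.inr (Or.inr h)
      · rintro (h | h | h)
        · exact Or.inl (Bool.or_eq_true_iff.mpr (Or.inr h))
        · exact Or.inl (Bool.or_eq_true_iff.mpr (Or.inl (beq_iff_eq.mpr h)))
        · exact Or.inr h
    · have hv' : pvValid a = false := by
        simp only [pvValid, Bool.and_eq_false_iff, decide_eq_false_iff_not]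
        by_cases h3 : (3:Int) ≤ PySem.Str.len a
        · exact Or.inr (fun h => hv ⟨h3, h⟩)
        · exact Or.inl h3
      rw [hv', if_neg Bool.false_ne_true, if_neg hv]
      exact ih d

-- B's output is the concatenation of the per-length sorted buckets, lengths 20 down to 3
theorem pvB_shape (numbers : List String) :
    filter_and_dedupe_py_alt numbers
      = (PySem.List.pyRange 20 2 (-1)).flatMap
          (fun n => PySem.List.sorted (pvS numbers n) (fun x => x)) := by
  rw [filter_and_dedupe_py_alt]
  have hfun : (fun (acc : List String) n =>
      if (numbers.foldl
        (fun d num =>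
          if 3 ≤ PySem.Str.len num ∧ PySem.Str.len num ≤ 20 then
            d.insert (PySem.Str.len num) (PySem.Set.add (d.getD (PySem.Str.len num) PySem.Set.empty) num)
          else d) PySem.Dict.empty).contains n then
        acc ++ PySem.List.sorted ((numbers.foldl
        (fun d num =>
          if 3 ≤ PySem.Str.len num ∧ PySem.Str.len num ≤ 20 then
            d.insert (PySem.Str.len num) (PySem.Set.add (d.getD (PySem.Str.len num) PySem.Set.empty) num)
          else d) PySem.Dict.empty).getD n PySem.Set.empty) (fun x => x)
      else acc)
      = (fun acc n => acc ++ (if (numbers.foldl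
        (fun d num =>
          if 3 ≤ PySem.Str.len num ∧ PySem.Str.len num ≤ 20 then
            d.insert (PySem.Str.len num) (PySem.Set.add (d.getD (PySem.Str.len num) PySem.Set.empty) num)
          else d) PySem.Dict.empty).contains n then PySem.List.sorted ((numbers.foldl
        (fun d num =>
          if 3 ≤ PySem.Str.len num ∧ PySem.Str.len num ≤ 20 then
            d.insert (PySem.Str.len num) (PySem.Set.add (d.getD (PySem.Str.len num) PySem.Set.empty) num)
          else d) PySem.Dict.empty).getD n PySem.Set.empty) (fun x => x) else [])) := by
    funext acc n; split <;> simp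
  rw [hfun, PySem.List.foldl_append_eq_flatMap, List.nil_append]
  refine List.flatMap_congr ?_
  intro n _
  by_cases hc : (numbers.foldl
      (fun d num =>
        if 3 ≤ PySem.Str.len num ∧ PySem.Str.len num ≤ 20 then
          d.insert (PySem.Str.len num) (PySem.Set.add (d.getD (PySem.Str.len num) PySem.Set.empty) num)
        else d) PySem.Dict.empty).contains n = true
  · rw [if_pos hc, pvB_getD, pvS, PySem.Set.ofList_eq_foldl]; rfl
  · rw [if_neg hc]
    have hno : n ∉ (numbers.filter pvValid).map PySem.Str.len := by
      intro hmem
      exact hc ((pvB_contains numbers PySem.Dict.empty n).mpr (Or.inr hmem))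
    have hnil : (numbers.filter pvValid).filter (fun s => PySem.Str.len s == n) = [] := by
      rw [List.filter_eq_nil_iff]
      intro a ha hb
      exact hno (List.mem_map.mpr ⟨a, ha, beq_iff_eq.mp hb⟩)
    rw [pvS, hnil]
    rfl

-- the per-length buckets repartition any list whose lengths all lie in the (duplicate-free) key list
theorem pv_sum_aux (ks : List Int) (hks : ks.Nodup) (m : Int) (hm : m ∈ ks) (c : Nat) :
    (ks.map (fun k => if m = k then c else 0)).sum = c := by
  induction ks with
  | nil => cases hm
  | cons k ks ih =>
    rw [List.map_cons, List.sum_cons]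
    rcases List.mem_cons.mp hm with h | h
    · rw [if_pos h, List.sum_eq_zero, Nat.add_zero]
      intro y hy
      obtain ⟨k', hk', rfl⟩ := List.mem_map.mp hy
      rw [if_neg]; intro he
      exact (List.nodup_cons.mp hks).1 (h ▸ he ▸ hk')
    · rw [if_neg, Nat.zero_add, ih (List.nodup_cons.mp hks).2 h]
      intro he; exact (List.nodup_cons.mp hks).1 (he ▸ h)

theorem pv_partition_perm (u : List String) (ks : List Int) (hks : ks.Nodup)
    (hall : ∀ x ∈ u, PySem.Str.len x ∈ ks) :
    (ks.flatMap fun k => u.filter (fun x => PySem.Str.len x == k)).Perm u := by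
  rw [List.perm_iff_count]
  intro x
  rw [List.count_flatMap]
  have hcnt : ∀ k : Int, List.count x (u.filter (fun y => PySem.Str.len y == k))
      = if PySem.Str.len x = k then List.count x u else 0 := by
    intro k
    by_cases h : PySem.Str.len x = k
    · rw [if_pos h, List.count_filter (by rw [beq_iff_eq]; exact h)]
    · rw [if_neg h, List.count_eq_zero]
      intro hmem
      exact h (beq_iff_eq.mp (List.mem_filter.mp hmem).2)
  by_cases hu : x ∈ u
  · calc (ks.map (List.count x ∘ fun k => u.filter (fun y => PySem.Str.len y == k))).sum
        = (ks.map (fun k => if PySem.Str.len x = k then List.count x u else 0)).sum := by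
          rw [List.map_congr_left]; intro k _; exact hcnt k
      _ = List.count x u := pv_sum_aux ks hks _ (hall x hu) _
  · rw [List.count_eq_zero.mpr hu, List.sum_eq_zero]
    intro y hy
    obtain ⟨k, hk, rfl⟩ := List.mem_map.mp hy
    simp only [Function.comp]
    rw [List.count_eq_zero]
    intro hmem
    exact hu (List.mem_filter.mp hmem).1

theorem pvKey_lt_iff (a b : String) :
    pvKey a < pvKey b ↔ (-(PySem.Str.len a) < -(PySem.Str.len b)
      ∨ (PySem.Str.len a = PySem.Str.len b ∧ a < b)) := by
  rw [pvKey, pvKey, Prod.Lex.lt_iff]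
  simp only [ofLex_toLex]
  constructor
  · rintro (h | h); · exact Or.inl h
    · exact Or.inr ⟨by omega, h.2⟩
  · rintro (h | h); · exact Or.inl h
    · exact Or.inr ⟨by omega, h.2⟩

theorem pv_len_of_mem_chunk (numbers : List String) (n : Int) (x : String)
    (hx : x ∈ PySem.List.sorted (pvS numbers n) (fun x => x)) : PySem.Str.len x = n := by
  have h1 := (PySem.List.mem_sorted _ _ _ _).mp hx
  rw [pvS] at h1
  have h2 := (PySem.Set.mem_ofList _ _).mp h1
  exact beq_iff_eq.mp (List.mem_filter.mp h2).2

-- the concatenated per-length sorted buckets are strictly increasing under A's sort key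
theorem pv_pairwise (numbers : List String) (ks : List Int)
    (hks : ks.Pairwise (fun a b => b < a)) :
    (ks.flatMap fun n => PySem.List.sorted (pvS numbers n) (fun x => x)).Pairwise
      (fun a b => pvKey a < pvKey b) := by
  induction ks with
  | nil => exact List.Pairwise.nil
  | cons k ks ih =>
    rw [List.flatMap_cons, List.pairwise_append]
    obtain ⟨hk, hks'⟩ := List.pairwise_cons.mp hks
    refine ⟨?_, ih hks', ?_⟩
    · refine List.Pairwise.imp_of_mem ?_ (PySem.List.sorted_ofList_pairwise_lt _)
      intro a b ha hb hlt
      have la := pv_len_of_mem_chunk numbers k a ha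
      have lb := pv_len_of_mem_chunk numbers k b hb
      exact (pvKey_lt_iff a b).mpr (Or.inr ⟨by rw [la, lb], hlt⟩)
    · intro a ha b hb
      obtain ⟨k', hk', hbk'⟩ := List.mem_flatMap.mp hb
      have la := pv_len_of_mem_chunk numbers k a ha
      have lb := pv_len_of_mem_chunk numbers k' b hbk'
      have := hk k' hk'
      exact (pvKey_lt_iff a b).mpr (Or.inl (by omega))

-- ===== VERDICT (by name: the statement is the Claim_ definition above) =====
theorem filter_and_dedupe_py_spec : Claim_equal_filter_and_dedupe_py := by
  intro numbers _
  show filter_and_dedupe_py numbers = filter_and_dedupe_py_alt numbers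
  rw [filter_and_dedupe_py,
    show (PySem.Set.empty, ([] : List String)) = (([] : List String), ([] : List String)) from rfl,
    pvA_loop,
    pv_sorted2_eq_sorted_lex, pvB_shape, ← PySem.Set.ofList_eq_foldl]
  refine PySem.List.sorted_eq_of_perm_of_pairwise_lt _ _ _ ?_ ?_
  · -- the concatenated buckets are a permutation of A's deduped list
    refine List.Perm.trans (List.Perm.flatMap (List.Perm.refl _)
      (fun n _ => PySem.List.sorted_perm (pvS numbers n) (fun x => x) false)) ?_
    have hrange : PySem.List.pyRange 20 2 (-1)
        = [20,19,18,17,16,15,14,13,12,11,10,9,8,7,6,5,4,3] := by decide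
    have hS : ∀ n : Int, (pvS numbers n : List String)
        = (PySem.Set.ofList (numbers.filter pvValid)).filter (fun x => PySem.Str.len x == n) := by
      intro n; rw [pvS, pv_ofList_filter]
    refine List.Perm.trans (List.Perm.of_eq (List.flatMap_congr (fun n _ => hS n))) ?_
    refine pv_partition_perm _ _ (by rw [hrange]; decide) ?_
    intro x hx
    have := (List.mem_filter.mp ((PySem.Set.mem_ofList _ _).mp hx)).2
    simp only [pvValid, Bool.and_eq_true, decide_eq_true_eq] at this
    rw [hrange]
    simp only [List.mem_cons, List.not_mem_nil, or_false]
    omega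
  · exact pv_pairwise numbers _ (by decide)
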